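-- pv_equiv track=rewrite | github.com/nakano000/Resolve_Script | library/python/rs/tool/voice_sync/voice_sync.py | pau_comp
-- ===== SOURCE A (Python) =====
-- def pau_comp(lab_data):
--     """pau、sil、brを一つにまとめる"""
--     r = []
--     _sub_list = None
--     for d in lab_data:
--         if d['sign'] in ['sil', 'pau', 'br']:
--             if _sub_list is None:
--                 _sub_list = []
--                 r.append(_sub_list)
--             _sub_list.append(d)
--         else:
--             _sub_list = None
--             r.append(d)
--     for i, d in enumerate(r):
--         if isinstance(d, list):
--             if len(d) == 1:
--                 r[i] = d[0]
--             else: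
--                 r[i] = {
--                     's': d[0]['s'],
--                     'e': d[-1]['e'],
--                     'sign': 'pau'
--                 }
--     return r
-- ===== SOURCE B (Python) =====
-- def pau_comp(lab_data):
--     """pau、sil、brを一つにまとめる"""
--     def is_sil(d):
--         return d['sign'] in ('sil', 'pau', 'br')
--     res = []
--     i, n = 0, len(lab_data)
--     while i < n:
--         k = is_sil(lab_data[i])
--         j = i + 1
--         while j < n and is_sil(lab_data[j]) == k:
--             j += 1
--         group = lab_data[i:j]
--         if not k:
--             res.extend(group)
--         elif len(group) == 1:
--             res.append(group[0])
--         else: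
--             res.append({'s': group[0]['s'], 'e': group[-1]['e'], 'sign': 'pau'})
--         i = j
--     return res
-- ===== Notes on version B (the rewrite author's own statement) =====
-- stated objective: simpler
-- what changed: A accumulates results into a list holding mutable aliased sub-lists of silence labels and then runs a second rewrite pass over it; B scans the input once over maximal silence/non-silence runs (groupby-style spans) and emits each run's result directly, with no intermediate structure and no second pass.
import Mathlib
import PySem

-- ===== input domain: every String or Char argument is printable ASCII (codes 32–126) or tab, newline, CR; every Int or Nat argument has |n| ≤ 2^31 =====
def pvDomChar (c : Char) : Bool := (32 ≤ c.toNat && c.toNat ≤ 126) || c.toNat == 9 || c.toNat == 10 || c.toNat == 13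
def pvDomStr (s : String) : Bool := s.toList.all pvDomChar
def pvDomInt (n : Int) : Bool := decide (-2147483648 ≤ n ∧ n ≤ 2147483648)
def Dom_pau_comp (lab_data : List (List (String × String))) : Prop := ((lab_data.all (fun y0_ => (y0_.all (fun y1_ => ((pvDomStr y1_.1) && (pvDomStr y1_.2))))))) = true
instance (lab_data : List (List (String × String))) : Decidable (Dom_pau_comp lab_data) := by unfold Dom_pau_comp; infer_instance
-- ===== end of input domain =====

-- B replaces A's stateful pass (mutable aliased sub-lists + a second rewrite pass) by a single
-- run-scanning pass over maximal silence/non-silence runs; objective: simpler one-pass decomposition.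

-- `d['sign'] in ['sil', 'pau', 'br']` (both Pythons evaluate this same expression; a missing
-- 'sign' key raises KeyError in Python and is excluded by Pre_; the `false` default is unclaimed)
def silB (d : List (String × String)) : Bool :=
  match d.lookup "sign" with
  | some s => s == "sil" || s == "pau" || s == "br"
  | none => false

-- the dict literal {'s': g[0]['s'], 'e': g[-1]['e'], 'sign': 'pau'} (identical in both Pythons;
-- the "" defaults are only reachable outside Pre_, where Python raises KeyError)
def mergedOf (g : List (List (String × String))) : List (String × String) :=
  [("s", ((g.headD []).lookup "s").getD ""),
   ("e", ((g.getLastD []).lookup "e").getD ""),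
   ("sign", "pau")]

-- ===== PORT A =====
-- r holds dicts (inl) and the aliased sub-lists of silence dicts (inr); kept reversed (cons = append),
-- with the currently open sub-list carried separately (Python mutates it through the alias).
def pauStep (st : List ((List (String × String)) ⊕ List (List (String × String))) ×
                  Option (List (List (String × String))))
    (d : List (String × String)) :
    List ((List (String × String)) ⊕ List (List (String × String))) ×
    Option (List (List (String × String))) :=
  if silB d then
    match st.2 with
    | none => (st.1, some [d])          -- _sub_list = []; r.append(_sub_list); _sub_list.append(d)
    | some g => (st.1, some (g ++ [d])) -- _sub_list.append(d)
  else
    match st.2 with                      -- _sub_list = None; r.append(d)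
    | none => (Sum.inl d :: st.1, none)
    | some g => (Sum.inl d :: Sum.inr g :: st.1, none)

-- second loop: replace each sub-list by its single element or the merged dict
def pauConv (it : (List (String × String)) ⊕ List (List (String × String))) :
    List (String × String) :=
  match it with
  | Sum.inl d => d
  | Sum.inr g => if g.length = 1 then g.headD [] else mergedOf g

def pau_comp (lab_data : List (List (String × String))) : List (List (String × String)) :=
  let st := lab_data.foldl pauStep ([], none)
  let r := (match st.2 with
            | some g => Sum.inr g :: st.1
            | none => st.1).reverse
  r.map pauConv

-- ===== PORT B =====
-- the inner while loop of Source B: split off the maximal run with the same is_sil value as the head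
def runsBy (f : List (String × String) → Bool) :
    List (List (String × String)) → List (List (List (String × String)))
  | [] => []
  | x :: xs =>
    (x :: xs.takeWhile (fun y => f y == f x)) :: runsBy f (xs.dropWhile (fun y => f y == f x))
  termination_by l => l.length
  decreasing_by
    simp only [List.length_cons]
    exact Nat.lt_succ_of_le (List.length_dropWhile_le _ _)

def pau_comp_alt (lab_data : List (List (String × String))) : List (List (String × String)) :=
  (runsBy silB lab_data).flatMap (fun g =>
    if !silB (g.headD []) then g
    else if g.length = 1 then [g.headD []]
    else [mergedOf g])

-- ===== PRECONDITION & SPEC =====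
def silAt (L : List (List (String × String))) (i : Nat) : Bool := silB (L.getD i [])

-- Pre_ = exactly the inputs where Python A returns: every dict has key 'sign', and in every maximal
-- silence run of length ≥ 2 the first dict has key 's' and the last has key 'e' (else KeyError).
def Pre_pau_comp (lab_data : List (List (String × String))) : Prop :=
  (∀ d ∈ lab_data, (d.lookup "sign").isSome) ∧
  (∀ i < lab_data.length,
    ((silAt lab_data i ∧ (i = 0 ∨ silAt lab_data (i - 1) = false) ∧ silAt lab_data (i + 1)) →
      ((lab_data.getD i []).lookup "s").isSome) ∧
    ((silAt lab_data i ∧ 0 < i ∧ silAt lab_data (i - 1) ∧ silAt lab_data (i + 1) = false) →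
      ((lab_data.getD i []).lookup "e").isSome))
instance (lab_data : List (List (String × String))) : Decidable (Pre_pau_comp lab_data) := by
  unfold Pre_pau_comp; infer_instance

def pvWitness_pau_comp : (List (List (String × String))) :=
  [[("sign", "a"), ("s", "0"), ("e", "1")],
   [("sign", "sil"), ("s", "1"), ("e", "2")],
   [("sign", "pau"), ("s", "2"), ("e", "3")],
   [("sign", "k"), ("s", "3"), ("e", "4")]]

def Spec_pau_comp (lab_data : List (List (String × String))) (out : List (List (String × String))) : Prop := out = pau_comp_alt lab_data
instance (lab_data : List (List (String × String))) (out : List (List (String × String))) : Decidable (Spec_pau_comp lab_data out) := by unfold Spec_pau_comp; infer_instance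

-- ===== CLAIM (what is proved, stated in full; the proofs are below) =====
def Claim_equal_pau_comp : Prop := ∀ (lab_data : List (List (String × String))), Dom_pau_comp lab_data → Pre_pau_comp lab_data → Spec_pau_comp lab_data (pau_comp lab_data)

-- ===== LEMMAS AND PROOFS =====

-- the second loop applied to the final r, as a function of the fold state
def pauFinish (st : List ((List (String × String)) ⊕ List (List (String × String))) ×
                    Option (List (List (String × String)))) :
    List (List (String × String)) :=
  ((match st.2 with
    | some g => Sum.inr g :: st.1
    | none => st.1).reverse).map pauConv

theorem pau_comp_eq_finish (L : List (List (String × String))) :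
    pau_comp L = pauFinish (L.foldl pauStep ([], none)) := rfl

-- a non-silence prefix passes through pau_comp_alt unchanged
theorem alt_takeWhile_nonsil (L : List (List (String × String))) :
    L.takeWhile (fun y => !silB y) ++ pau_comp_alt (L.dropWhile (fun y => !silB y)) =
      pau_comp_alt L := by
  cases L with
  | nil => simp [pau_comp_alt, runsBy]
  | cons z zs =>
    by_cases hz : silB z = true
    · simp [hz]
    · simp only [Bool.not_eq_true] at hz
      simp only [List.takeWhile_cons, List.dropWhile_cons, hz, Bool.not_false]
      conv_rhs => rw [pau_comp_alt, runsBy]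
      simp [pau_comp_alt, hz, beq_false]

theorem alt_cons_nonsil (e : List (String × String)) (rest : List (List (String × String)))
    (he : silB e = false) : pau_comp_alt (e :: rest) = e :: pau_comp_alt rest := by
  conv_lhs => rw [pau_comp_alt, runsBy]
  simp only [he, beq_false, List.headD_cons, Bool.not_false, List.flatMap_cons]
  rw [show (runsBy silB (rest.dropWhile fun y => !silB y)).flatMap _ =
        pau_comp_alt (rest.dropWhile fun y => !silB y) from rfl]
  simp only [if_true, List.cons_append]
  rw [alt_takeWhile_nonsil]

-- feeding a run of silences into an open sub-list
theorem foldl_sil (s : List (List (String × String))) (hs : ∀ y ∈ s, silB y = true) :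
    ∀ (t : List (List (String × String)))
      (r : List ((List (String × String)) ⊕ List (List (String × String))))
      (g : List (List (String × String))),
      (s ++ t).foldl pauStep (r, some g) = t.foldl pauStep (r, some (g ++ s)) := by
  induction s with
  | nil => intro t r g; simp
  | cons y ys ih =>
    intro t r g
    have hy : silB y = true := hs y (by simp)
    have hys : ∀ z ∈ ys, silB z = true := fun z hz => hs z (by simp [hz])
    simp only [List.cons_append, List.foldl_cons, pauStep, hy, if_true]
    rw [ih hys t r (g ++ [y])]
    simp

-- main invariant: the fold-then-finish of A equals the already-emitted prefix plus B on the rest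
theorem main_gen : ∀ (n : Nat) (L : List (List (String × String)))
    (r : List ((List (String × String)) ⊕ List (List (String × String)))),
    L.length ≤ n →
    pauFinish (L.foldl pauStep (r, none)) = (r.reverse).map pauConv ++ pau_comp_alt L := by
  intro n
  induction n with
  | zero =>
    intro L r hL
    rw [List.length_eq_zero_iff.mp (Nat.le_zero.mp hL)]
    simp [pauFinish, pau_comp_alt, runsBy]
  | succ m ih =>
    intro L r hL
    cases L with
    | nil => simp [pauFinish, pau_comp_alt, runsBy]
    | cons d xs =>
      have hxs : xs.length ≤ m := by simpa using hL
      by_cases hd : silB d = true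
      · -- silence head: the whole maximal silence run goes into one sub-list
        set tw := xs.takeWhile silB with htw
        set rest := xs.dropWhile silB with hrest
        have hsplit : xs = tw ++ rest := (List.takeWhile_append_dropWhile).symm
        have hall : ∀ y ∈ tw, silB y = true := fun y hy => List.mem_takeWhile_imp hy
        have hfold : (d :: xs).foldl pauStep (r, none) =
            rest.foldl pauStep (r, some (d :: tw)) := by
          conv_lhs => rw [hsplit]
          simp only [List.foldl_cons, pauStep, hd, if_true]
          rw [foldl_sil tw hall rest r [d]]
          simp
        have haltd : pau_comp_alt (d :: xs) =
            (if (d :: tw).length = 1 then [(d :: tw).headD []] else [mergedOf (d :: tw)]) ++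
              pau_comp_alt rest := by
          conv_lhs => rw [pau_comp_alt, runsBy]
          simp only [hd, beq_true, List.headD_cons, Bool.not_true, Bool.false_eq_true,
            if_false, List.flatMap_cons]
          rw [← htw, ← hrest]
          rw [show (runsBy silB rest).flatMap _ = pau_comp_alt rest from rfl]
        have hrlen : rest.length ≤ xs.length := List.length_dropWhile_le _ _
        cases hre : rest with
        | nil =>
          rw [hfold, hre]
          simp only [List.foldl_nil, pauFinish, List.reverse_cons, List.map_append]
          rw [haltd, hre]
          simp only [pau_comp_alt, runsBy, List.flatMap_nil, List.append_nil]
          simp only [List.map_cons, List.map_nil]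
          by_cases h0 : tw = [] <;> simp [pauConv, h0]
        | cons e rest' =>
          have he : silB e = false := by
            have := List.head_dropWhile_not silB (l := xs) (by rw [← hrest, hre]; simp)
            simpa [← hrest, hre] using this
          have hr' : rest'.length ≤ m := by
            have h1 : rest.length ≤ m := le_trans hrlen hxs
            have h2 := congrArg List.length hre
            simp at h2
            omega
          rw [hfold, hre]
          simp only [List.foldl_cons, pauStep, he, Bool.false_eq_true, if_false]
          rw [ih rest' (Sum.inl e :: Sum.inr (d :: tw) :: r) hr']
          rw [haltd, hre, alt_cons_nonsil e rest' he]
          by_cases h0 : tw = [] <;> simp [pauConv, h0]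
      · -- non-silence head: emitted unchanged
        simp only [Bool.not_eq_true] at hd
        simp only [List.foldl_cons, pauStep, hd, Bool.false_eq_true, if_false]
        rw [ih xs (Sum.inl d :: r) hxs, alt_cons_nonsil d xs hd]
        simp [pauConv]

-- ===== VERDICT (by name: the statement is the Claim_ definition above) =====
theorem pau_comp_spec : Claim_equal_pau_comp := by
  intro L _ _
  unfold Spec_pau_comp
  rw [pau_comp_eq_finish, main_gen L.length L [] (le_refl _)]
  simp
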